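-- pv_equiv track=rewrite | github.com/kaushik701/Coding-Interview-Questions | Graphs/RectangleMania.py | getCoordsTable
-- ===== SOURCE A (Python) =====
-- def getCoordsTable(coords):
-- 	coordsTable = {}
-- 	for coord1 in coords:
-- 		coord1Directions = {
-- 			UP:[], RIGHT:[], DOWN:[], LEFT:[]
-- 		}
-- 		for coord2 in coords:
-- 			coord2Direction = getCoordDirection(coord1,coord2)
-- 			if coord2Direction in coord1Directions:
-- 				coord1Directions[coord2Direction].append(coord2)
-- 		coord1String = coordToString(coord1)
-- 		coordsTable[coord1String] = coord1Directions
-- 	return coordsTable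
--
-- def getCoordDirection(coord1,coord2):
-- 	x1,y1 = coord1
-- 	x2,y2 = coord2
-- 	if y2 == y1:
-- 		if x2 > x1:
-- 			return RIGHT
-- 		elif x2 < x1:
-- 			return LEFT
-- 	elif x2 == x1:
-- 		if y2 > y1:
-- 			return UP
-- 		elif y2 < y1:
-- 			return DOWN
-- 	return " "
--
-- def coordToString(coord):
-- 	x,y = coord
-- 	return str(x) + '-' + str(y)
--
-- UP = 'up'
--
-- RIGHT = 'right'
--
-- DOWN = 'down'
--
-- LEFT = 'left'
-- ===== SOURCE B (Python) =====
-- def getCoordsTable(coords):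
--     # Index coords by row (y) and by column (x); each direction list is a
--     # filter of the relevant group, in original order.
--     rows = {}
--     cols = {}
--     for c in coords:
--         rows.setdefault(c[1], []).append(c)
--         cols.setdefault(c[0], []).append(c)
--     table = {}
--     for c in coords:
--         x, y = c
--         row = rows[y]
--         col = cols[x]
--         table[str(x) + '-' + str(y)] = {
--             'up': [p for p in col if p[1] > y],
--             'right': [p for p in row if p[0] > x],
--             'down': [p for p in col if p[1] < y],
--             'left': [p for p in row if p[0] < x],
--         }
--     return table
-- ===== Notes on version B (the rewrite author's own statement) =====
-- stated objective: faster
-- what changed: Instead of the O(n^2) all-pairs inner scan per coordinate, B indexes the coords once by row (y) and by column (x) and builds each direction list by filtering only the coordinate's own row/column group, preserving original order.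
import Mathlib
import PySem

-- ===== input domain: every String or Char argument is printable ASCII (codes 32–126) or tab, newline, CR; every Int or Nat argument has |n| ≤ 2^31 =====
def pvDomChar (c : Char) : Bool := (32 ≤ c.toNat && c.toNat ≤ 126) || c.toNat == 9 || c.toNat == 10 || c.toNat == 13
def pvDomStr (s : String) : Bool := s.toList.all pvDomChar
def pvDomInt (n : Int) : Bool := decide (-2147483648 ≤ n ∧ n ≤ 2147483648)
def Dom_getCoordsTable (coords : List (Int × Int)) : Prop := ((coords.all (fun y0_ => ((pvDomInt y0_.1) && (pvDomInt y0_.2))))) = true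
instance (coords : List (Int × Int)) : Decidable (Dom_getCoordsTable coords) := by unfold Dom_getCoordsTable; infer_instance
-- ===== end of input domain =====

-- B replaces A's all-pairs inner scan by row/column indexes built once, so each
-- direction list is a filter of that coordinate's own row or column group (faster).
-- Python dicts are rendered as association lists in insertion order per the type convention.

-- ===== PORT A =====
def getCoordDirection (c1 c2 : Int × Int) : String :=
  if c2.2 == c1.2 then
    (if c2.1 > c1.1 then "right" else if c2.1 < c1.1 then "left" else " ")
  else if c2.1 == c1.1 then
    (if c2.2 > c1.2 then "up" else if c2.2 < c1.2 then "down" else " ")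
  else " "

def coordToString (c : Int × Int) : String :=
  PySem.Int.toStr c.1 ++ "-" ++ PySem.Int.toStr c.2

-- `if coord2Direction in coord1Directions: coord1Directions[coord2Direction].append(coord2)`
def pvDirStep (c1 : Int × Int) (d : PySem.Dict String (List (Int × Int))) (c2 : Int × Int) :
    PySem.Dict String (List (Int × Int)) :=
  let dir := getCoordDirection c1 c2
  if d.contains dir then d.insert dir (d.getD dir [] ++ [c2]) else d

def getCoordsTable (coords : List (Int × Int)) : List (String × List (String × List (Int × Int))) :=
  (coords.foldl (fun t c1 =>
      let dirs := coords.foldl (pvDirStep c1)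
        (PySem.Dict.ofList [("up", []), ("right", []), ("down", []), ("left", [])])
      t.insert (coordToString c1) dirs.items)
    (PySem.Dict.empty : PySem.Dict String (List (String × List (Int × Int))))).items

-- ===== PORT B =====
def getCoordsTable_alt (coords : List (Int × Int)) : List (String × List (String × List (Int × Int))) :=
  let rows := coords.foldl (fun d c => d.modify c.2 [] (· ++ [c]))
    (PySem.Dict.empty : PySem.Dict Int (List (Int × Int)))
  let cols := coords.foldl (fun d c => d.modify c.1 [] (· ++ [c]))
    (PySem.Dict.empty : PySem.Dict Int (List (Int × Int)))
  (coords.foldl (fun t c =>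
      let row := rows.getD c.2 []
      let col := cols.getD c.1 []
      t.insert (PySem.Int.toStr c.1 ++ "-" ++ PySem.Int.toStr c.2)
        [("up",    col.filter (fun p => decide (c.2 < p.2))),
         ("right", row.filter (fun p => decide (c.1 < p.1))),
         ("down",  col.filter (fun p => decide (p.2 < c.2))),
         ("left",  row.filter (fun p => decide (p.1 < c.1)))])
    (PySem.Dict.empty : PySem.Dict String (List (String × List (Int × Int))))).items

-- ===== PRECONDITION & SPEC =====
def Spec_getCoordsTable (coords : List (Int × Int)) (out : List (String × List (String × List (Int × Int)))) : Prop := out = getCoordsTable_alt coords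
instance (coords : List (Int × Int)) (out : List (String × List (String × List (Int × Int)))) : Decidable (Spec_getCoordsTable coords out) := by unfold Spec_getCoordsTable; infer_instance

-- ===== CLAIM (what is proved, stated in full; the proofs are below) =====
def Claim_equal_getCoordsTable : Prop := ∀ (coords : List (Int × Int)), Dom_getCoordsTable coords → Spec_getCoordsTable coords (getCoordsTable coords)

-- ===== LEMMAS AND PROOFS =====

-- one step of A's inner loop on the four-direction dict, as four conditional appends
theorem pvDirStep_mk (c1 x : Int × Int) (a b c e : List (Int × Int)) :
    pvDirStep c1 (PySem.Dict.mk [("up",a),("right",b),("down",c),("left",e)]) x =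
    PySem.Dict.mk [("up",a ++ (if x.1 = c1.1 ∧ c1.2 < x.2 then [x] else [])),
                   ("right",b ++ (if x.2 = c1.2 ∧ c1.1 < x.1 then [x] else [])),
                   ("down",c ++ (if x.1 = c1.1 ∧ x.2 < c1.2 then [x] else [])),
                   ("left",e ++ (if x.2 = c1.2 ∧ x.1 < c1.1 then [x] else []))] := by
  unfold pvDirStep
  by_cases h1 : x.2 = c1.2
  · by_cases h3 : c1.1 < x.1
    · have hd : getCoordDirection c1 x = "right" := by simp [getCoordDirection, h1, h3]
      rw [hd]
      apply PySem.Dict.ext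
      rw [if_pos (by simp), PySem.Dict.items_insert]
      simp [h1, h3, PySem.Dict.getD_eq_get?_getD, PySem.Dict.get?_mk_cons]
      omega
    · by_cases h4 : x.1 < c1.1
      · have hd : getCoordDirection c1 x = "left" := by simp [getCoordDirection, h1, h3, h4]
        rw [hd]
        apply PySem.Dict.ext
        rw [if_pos (by simp), PySem.Dict.items_insert]
        simp [h1, h3, h4, PySem.Dict.getD_eq_get?_getD, PySem.Dict.get?_mk_cons]
      · have hd : getCoordDirection c1 x = " " := by simp [getCoordDirection, h1, h3, h4]
        rw [hd]
        rw [if_neg (by simp)]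
        simp [h1, h3, h4]
  · by_cases h2 : x.1 = c1.1
    · by_cases h5 : c1.2 < x.2
      · have hd : getCoordDirection c1 x = "up" := by simp [getCoordDirection, h1, h2, h5]
        rw [hd]
        apply PySem.Dict.ext
        rw [if_pos (by simp), PySem.Dict.items_insert]
        simp [h1, h2, h5, PySem.Dict.getD_eq_get?_getD, PySem.Dict.get?_mk_cons]
        omega
      · by_cases h6 : x.2 < c1.2
        · have hd : getCoordDirection c1 x = "down" := by simp [getCoordDirection, h1, h2, h5, h6]
          rw [hd]
          apply PySem.Dict.ext
          rw [if_pos (by simp), PySem.Dict.items_insert]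
          simp [h1, h2, h5, h6, PySem.Dict.getD_eq_get?_getD, PySem.Dict.get?_mk_cons]
        · omega
    · have hd : getCoordDirection c1 x = " " := by simp [getCoordDirection, h1, h2]
      rw [hd]
      rw [if_neg (by simp)]
      simp [h1, h2]

theorem pvIfSingletonAppend {α : Type} (P : Prop) [Decidable P] (x : α) (L : List α) :
    (if P then [x] else []) ++ L = if P then x :: L else L := by
  split <;> simp

-- A's whole inner loop = four filters over the scanned list
theorem pvInnerLoop (c1 : Int × Int) (l : List (Int × Int)) : ∀ a b c e : List (Int × Int),
    l.foldl (pvDirStep c1) (PySem.Dict.mk [("up",a),("right",b),("down",c),("left",e)]) =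
    PySem.Dict.mk [("up",a ++ l.filter (fun q => decide (q.1 = c1.1 ∧ c1.2 < q.2))),
                   ("right",b ++ l.filter (fun q => decide (q.2 = c1.2 ∧ c1.1 < q.1))),
                   ("down",c ++ l.filter (fun q => decide (q.1 = c1.1 ∧ q.2 < c1.2))),
                   ("left",e ++ l.filter (fun q => decide (q.2 = c1.2 ∧ q.1 < c1.1)))] := by
  induction l with
  | nil => intro a b c e; simp
  | cons x t ih =>
    intro a b c e
    rw [List.foldl_cons, pvDirStep_mk, ih]
    simp only [List.filter_cons, List.append_assoc, decide_eq_true_eq, pvIfSingletonAppend]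

-- the row/column index of B looked up at a key = a filter of coords, in order
theorem pvGroupGetD (coords : List (Int × Int)) (key : (Int × Int) → Int) (y : Int) :
    (coords.foldl (fun d c => d.modify (key c) [] (· ++ [c]))
      (PySem.Dict.empty : PySem.Dict Int (List (Int × Int)))).getD y [] =
    coords.filter (fun c => key c == y) := by
  have h := PySem.Dict.getD_foldl_modify_append (coords.map (fun c => (key c, c)))
    (PySem.Dict.empty : PySem.Dict Int (List (Int × Int))) y
  rw [List.foldl_map, List.filter_map, List.map_map] at h
  simpa [Function.comp_def] using h

-- ===== VERDICT (by name: the statement is the Claim_ definition above) =====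
theorem getCoordsTable_spec : Claim_equal_getCoordsTable := by
  intro coords _
  unfold Spec_getCoordsTable getCoordsTable getCoordsTable_alt
  congr 1
  apply PySem.List.foldl_congr_mem
  intro t c1 _
  have hinit : (PySem.Dict.ofList [("up", []), ("right", []), ("down", []), ("left", [])] :
      PySem.Dict String (List (Int × Int))) =
      PySem.Dict.mk [("up",[]),("right",[]),("down",[]),("left",[])] := rfl
  rw [hinit, pvInnerLoop c1 coords [] [] [] []]
  rw [pvGroupGetD coords (·.2) c1.2, pvGroupGetD coords (·.1) c1.1]
  simp only [List.filter_filter, List.nil_append]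
  unfold coordToString
  apply congrArg
  simp only [List.cons.injEq, Prod.mk.injEq, and_true, true_and]
  refine ⟨?_, ?_, ?_, ?_⟩ <;>
    · apply List.filter_congr
      intro q _
      by_cases h1 : q.1 = c1.1 <;> by_cases h2 : q.2 = c1.2 <;>
        by_cases h3 : c1.2 < q.2 <;> by_cases h4 : c1.1 < q.1 <;>
        by_cases h5 : q.2 < c1.2 <;> by_cases h6 : q.1 < c1.1 <;>
        first
        | omega
        | simp [h1, h2, h3, h4, h5, h6]
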